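-- pv_equiv track=rewrite | github.com/Superstars111/anime-display | project/standalone_functions.py | collect_colors
-- ===== SOURCE A (Python) =====
-- def collect_colors(scores: list[int]) -> list[str]:
--     """
--     Turns a list of ints into a list of colors.
--
--     - 0 = black
--     - 1-54 = red
--     - 55-69 = orange
--     - 70-84 = blue
--     - 85+ = purple
--
--     :param scores: A list of scores
--     :return: A list of colors corresponding to the scores passed in
--     """
--     colors = []
--     for score in scores:
--         if score >= 85:
--             colors.append("purple")
--         elif score >= 70:
--             colors.append("blue")
--         elif score >= 55:
--             colors.append("orange")
--         elif score >= 1: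
--             colors.append("red")
--         else:
--             colors.append("black")
--     return colors
-- ===== SOURCE B (Python) =====
-- NAMES = ["black", "red", "orange", "blue", "purple"]
-- BOUNDS = (1, 55, 70, 85)
--
-- def collect_colors(scores: list[int]) -> list[str]:
--     # bucket index = number of bounds <= score; table lookup instead of an if/elif cascade
--     return [NAMES[sum(score >= b for b in BOUNDS)] for score in scores]
-- ===== Notes on version B (the rewrite author's own statement) =====
-- stated objective: idiomatic
-- what changed: Replaces the per-score if/elif threshold cascade with a data-driven bucket lookup: the index into a color table is the count of threshold bounds the score reaches, built as a single list comprehension.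
import Mathlib
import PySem

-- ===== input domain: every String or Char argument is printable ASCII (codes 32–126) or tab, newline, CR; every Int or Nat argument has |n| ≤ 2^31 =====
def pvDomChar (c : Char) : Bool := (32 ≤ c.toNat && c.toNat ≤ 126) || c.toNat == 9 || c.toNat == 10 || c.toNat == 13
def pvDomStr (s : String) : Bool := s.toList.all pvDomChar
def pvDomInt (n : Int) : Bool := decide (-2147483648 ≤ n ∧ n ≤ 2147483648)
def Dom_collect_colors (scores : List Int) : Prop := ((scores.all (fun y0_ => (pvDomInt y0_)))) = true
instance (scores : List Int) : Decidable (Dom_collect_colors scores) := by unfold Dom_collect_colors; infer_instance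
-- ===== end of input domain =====

-- B replaces the per-score if/elif cascade with a bucket-index lookup into a color table (idiomatic; same cost).
-- ===== PORT A =====
def collect_colors (scores : List Int) : List String :=
  scores.foldl (fun colors score =>
    colors ++ [if score ≥ 85 then "purple"
               else if score ≥ 70 then "blue"
               else if score ≥ 55 then "orange"
               else if score ≥ 1 then "red"
               else "black"]) []

-- ===== PORT B =====
def pvNames : List String := ["black", "red", "orange", "blue", "purple"]
def pvBounds : List Int := [1, 55, 70, 85]

def collect_colors_alt (scores : List Int) : List String :=
  scores.map (fun score =>
    pvNames.getD ((pvBounds.map (fun b => if score ≥ b then (1:Nat) else 0)).sum) "black")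

-- ===== PRECONDITION & SPEC =====
def Spec_collect_colors (scores : List Int) (out : List String) : Prop := out = collect_colors_alt scores
instance (scores : List Int) (out : List String) : Decidable (Spec_collect_colors scores out) := by unfold Spec_collect_colors; infer_instance

-- ===== CLAIM (what is proved, stated in full; the proofs are below) =====
def Claim_equal_collect_colors : Prop := ∀ (scores : List Int), Dom_collect_colors scores → Spec_collect_colors scores (collect_colors scores)

-- ===== LEMMAS AND PROOFS =====

-- ===== VERDICT (by name: the statement is the Claim_ definition above) =====
theorem pv_foldl_eq (scores : List Int) (f : Int → String) (acc : List String) :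
    scores.foldl (fun colors score => colors ++ [f score]) acc = acc ++ scores.map f := by
  induction scores generalizing acc with
  | nil => simp
  | cons x xs ih => simp [List.foldl, ih]

theorem collect_colors_spec : Claim_equal_collect_colors := by
  intro scores _
  unfold Spec_collect_colors collect_colors collect_colors_alt
  rw [pv_foldl_eq]
  simp only [List.nil_append]
  apply List.map_congr_left
  intro s _
  simp only [pvBounds, pvNames, List.map, List.sum]
  split_ifs <;> first | rfl | omega
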